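-- pv_equiv track=rewrite | github.com/ridhachahed/AOC-2024 | Day19/day_19.py | general
-- ===== SOURCE A (Python) =====
-- def recursive_towels(towels_available_set, towel_desired, maximum_towel_size, memory):
--     if len(towel_desired) == 0:
--         return True
--     elif towel_desired in memory:
--         return memory[towel_desired]
--     else:
--         element_to_check = min(maximum_towel_size, len(towel_desired))
--         for i in range(1, element_to_check + 1):
--             element = towel_desired[:i]
--             element_string = "".join(element)
--             if element_string in towels_available_set:
--                 recursive_call = recursive_towels(towels_available_set, towel_desired[i:], maximum_towel_size, memory)
--                 memory[towel_desired] = recursive_call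
--                 if recursive_call:
--                     return recursive_call
--         return False
--
-- def general(towels_available_set, towels_desired, maximum_towel_size):
--     result = 0
--     for towel_desired in towels_desired:
--         memory = {}
--         towel_result = recursive_towels(towels_available_set, towel_desired, maximum_towel_size, memory)
--         if towel_result:
--             result += 1
--     return result
-- ===== SOURCE B (Python) =====
-- def general(towels_available_set, towels_desired, maximum_towel_size):
--     pieces = set(towels_available_set)
--     count = 0
--     for desired in towels_desired:
--         n = len(desired)
--         dp = [True]  # dp[k] == suffix desired[i+k:] is segmentable (current boundary i)
--         for i in range(n - 1, -1, -1):
--             v = any(desired[i:i + j] in pieces and dp[j - 1]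
--                     for j in range(1, min(maximum_towel_size, n - i) + 1))
--             dp = [v] + dp
--         if dp[0]:
--             count += 1
--     return count
-- ===== Notes on version B (the rewrite author's own statement) =====
-- stated objective: alternative
-- what changed: Top-down memoized recursion threading a dict memo is replaced by a bottom-up boolean DP list over suffixes built back-to-front (dp[k] = suffix segmentable), with availability membership via a prebuilt set.
import Mathlib
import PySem

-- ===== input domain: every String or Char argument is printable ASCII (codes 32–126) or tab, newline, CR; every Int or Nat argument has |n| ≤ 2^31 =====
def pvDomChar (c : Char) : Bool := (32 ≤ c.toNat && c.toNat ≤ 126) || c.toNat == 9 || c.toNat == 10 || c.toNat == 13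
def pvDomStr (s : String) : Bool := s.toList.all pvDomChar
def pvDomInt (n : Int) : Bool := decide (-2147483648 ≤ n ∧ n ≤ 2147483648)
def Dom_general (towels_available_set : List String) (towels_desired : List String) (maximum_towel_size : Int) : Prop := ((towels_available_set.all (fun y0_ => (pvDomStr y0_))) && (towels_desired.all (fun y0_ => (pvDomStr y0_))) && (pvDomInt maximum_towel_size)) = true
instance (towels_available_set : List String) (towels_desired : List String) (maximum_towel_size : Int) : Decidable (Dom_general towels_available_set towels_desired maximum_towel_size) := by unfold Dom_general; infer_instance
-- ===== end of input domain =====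

-- B replaces A's top-down memoized recursion (a dict memo threaded through recursive calls)
-- by a bottom-up boolean DP list over suffixes built back-to-front; return values agree everywhere.

-- ===== PORT A =====
-- recursive_towels, with the memo dict threaded through explicitly (Python mutates it in place)
-- and a fuel argument that only makes the recursion total: each recursive call is on a strictly
-- shorter string, so fuel = len(towel_desired)+1 at the top call is never exhausted.
-- Strings are handled as List Char; the memo is keyed by the suffix (Python keys it by the same string).
mutual
def recTowels (avail : List String) (m : Int) :
    Nat → List Char → PySem.Dict (List Char) Bool → Bool × PySem.Dict (List Char) Bool
  | 0, _, mem => (false, mem)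
  | fuel+1, d, mem =>
    if d.length = 0 then (true, mem)
    else
      match mem.get? d with
      | some v => (v, mem)
      | none =>
        -- element_to_check = min(maximum_towel_size, len(towel_desired)); loop for i in range(1, etc+1)
        recLoop avail m fuel d mem (PySem.List.pyRange 1 (min m ((d.length : Int)) + 1) 1)
termination_by fuel => (fuel, 0)

-- the for-loop body of recursive_towels, one call per remaining loop index
def recLoop (avail : List String) (m : Int) (fuel : Nat) (d : List Char) :
    PySem.Dict (List Char) Bool → List Int → Bool × PySem.Dict (List Char) Bool
  | mem, [] => (false, mem)          -- loop fell through: return False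
  | mem, i :: is =>
    -- element = towel_desired[:i]; element_string = "".join(element) (identity on a string)
    let elementString := String.ofList (d.take i.toNat)
    if avail.contains elementString then
      let r := recTowels avail m fuel (d.drop i.toNat) mem
      let mem2 := r.2.insert d r.1    -- memory[towel_desired] = recursive_call
      if r.1 then (r.1, mem2) else recLoop avail m fuel d mem2 is
    else recLoop avail m fuel d mem is
termination_by _ is => (fuel, is.length + 1)
end

def general (towels_available_set : List String) (towels_desired : List String) (maximum_towel_size : Int) : Int :=
  towels_desired.foldl
    (fun result td =>
      let r := recTowels towels_available_set maximum_towel_size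
                 (td.toList.length + 1) td.toList PySem.Dict.empty
      if r.1 then result + 1 else result)
    0

-- ===== PORT B =====
-- bottom-up DP from Source B: dp is a list of booleans for the suffixes from the current boundary to
-- the end (dp[k] = desired[i+k:] segmentable); it is extended by cons as i runs n-1 .. 0.
-- desired[i:i+j] is (drop i).take j (exact: 0 ≤ i, 0 ≤ j); dp[j-1] and dp[0] are always in range.
def general_alt (towels_available_set : List String) (towels_desired : List String) (maximum_towel_size : Int) : Int :=
  let pieces := PySem.Set.ofList towels_available_set
  towels_desired.foldl
    (fun count desired =>
      let d := desired.toList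
      let n : Int := d.length
      let dp :=
        (PySem.List.pyRange (n - 1) (-1) (-1)).foldl
          (fun dp i =>
            let v := (PySem.List.pyRange 1 (min maximum_towel_size (n - i) + 1) 1).any
              (fun j => PySem.Set.contains pieces (String.ofList ((d.drop i.toNat).take j.toNat))
                        && PySem.List.pyGetD dp (j - 1) false)
            v :: dp)
          [true]
      count + (if PySem.List.pyGetD dp 0 false then 1 else 0))
    0

-- ===== PRECONDITION & SPEC =====
def Spec_general (towels_available_set : List String) (towels_desired : List String) (maximum_towel_size : Int) (out : Int) : Prop := out = general_alt towels_available_set towels_desired maximum_towel_size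
instance (towels_available_set : List String) (towels_desired : List String) (maximum_towel_size : Int) (out : Int) : Decidable (Spec_general towels_available_set towels_desired maximum_towel_size out) := by unfold Spec_general; infer_instance

-- ===== CLAIM (what is proved, stated in full; the proofs are below) =====
def Claim_equal_general : Prop := ∀ (towels_available_set : List String) (towels_desired : List String) (maximum_towel_size : Int), Dom_general towels_available_set towels_desired maximum_towel_size → Spec_general towels_available_set towels_desired maximum_towel_size (general towels_available_set towels_desired maximum_towel_size)

-- ===== LEMMAS AND PROOFS =====

-- the common mathematical value: seg d = "d is segmentable into available pieces of length ≤ m"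
def seg (avail : List String) (m : Int) (d : List Char) : Bool :=
  if h : d = [] then true
  else
    (PySem.List.pyRange 1 (min m ((d.length : Int)) + 1) 1).attach.any
      (fun p => avail.contains (String.ofList (d.take p.1.toNat)) && seg avail m (d.drop p.1.toNat))
termination_by d.length
decreasing_by
  have h1 : 1 ≤ p.1 := ((PySem.List.mem_pyRange_one.mp p.2).1)
  have h2 : d.length ≠ 0 := fun hz => h (List.eq_nil_of_length_eq_zero hz)
  have : 1 ≤ p.1.toNat := by omega
  simp [List.length_drop]; omega

lemma seg_nil (avail : List String) (m : Int) : seg avail m [] = true := by simp [seg]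

lemma seg_cons (avail : List String) (m : Int) (d : List Char) (hd : d ≠ []) :
    seg avail m d =
      (PySem.List.pyRange 1 (min m ((d.length : Int)) + 1) 1).any
        (fun i => avail.contains (String.ofList (d.take i.toNat)) && seg avail m (d.drop i.toNat)) := by
  rw [seg]
  simp [hd, List.any_eq]
  tauto

-- ---- A side ----

theorem recLoop_correct (avail : List String) (m : Int) (fuel : Nat)
    (IH : ∀ (d : List Char) (mem : PySem.Dict (List Char) Bool), d.length < fuel →
      (∀ s b, s.length ≤ d.length → mem.get? s = some b → b = seg avail m s) →
      (recTowels avail m fuel d mem).1 = seg avail m d ∧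
      (∀ s b, s.length ≤ d.length → (recTowels avail m fuel d mem).2.get? s = some b → b = seg avail m s) ∧
      (∀ s : List Char, d.length < s.length → (recTowels avail m fuel d mem).2.get? s = mem.get? s)) :
    ∀ (is : List Int) (d : List Char) (mem : PySem.Dict (List Char) Bool),
      d ≠ [] → d.length ≤ fuel →
      (∀ i ∈ is, 1 ≤ i ∧ i ≤ (d.length : Int)) →
      (∀ s b, s.length < d.length → mem.get? s = some b → b = seg avail m s) →
      (recLoop avail m fuel d mem is).1
        = is.any (fun i => avail.contains (String.ofList (d.take i.toNat)) && seg avail m (d.drop i.toNat)) ∧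
      (∀ s b, s.length < d.length → (recLoop avail m fuel d mem is).2.get? s = some b → b = seg avail m s) ∧
      (∀ s : List Char, s ≠ d → d.length ≤ s.length → (recLoop avail m fuel d mem is).2.get? s = mem.get? s) ∧
      ((recLoop avail m fuel d mem is).1 = true → (recLoop avail m fuel d mem is).2.get? d = some true) ∧
      ((recLoop avail m fuel d mem is).1 = false →
        (recLoop avail m fuel d mem is).2.get? d = mem.get? d ∨
        (recLoop avail m fuel d mem is).2.get? d = some false) := by
  intro is
  induction is with
  | nil =>
    intro d mem _ _ _ hinv
    have hres : recLoop avail m fuel d mem [] = (false, mem) := by simp only [recLoop]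
    rw [hres]
    exact ⟨by simp, hinv, fun _ _ _ => rfl, by simp, fun _ => Or.inl rfl⟩
  | cons i is ih =>
    intro d mem hd hf his hinv
    have hi := his i List.mem_cons_self
    have hdlen : 1 ≤ d.length := List.length_pos_iff.mpr hd
    have hitn : 1 ≤ i.toNat ∧ i.toNat ≤ d.length := by omega
    have hdroplt : (d.drop i.toNat).length < fuel := by
      rw [List.length_drop]; omega
    have hne_len : ∀ s : List Char, s.length < d.length → s ≠ d := by
      intro s hs hEq; rw [hEq] at hs; omega
    by_cases hc : avail.contains (String.ofList (d.take i.toNat)) = true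
    · obtain ⟨hr1, hr2, hr3⟩ := IH (d.drop i.toNat) mem hdroplt
        (fun s b hsl => hinv s b (by rw [List.length_drop] at hsl; omega))
      by_cases hrv : (recTowels avail m fuel (d.drop i.toNat) mem).1 = true
      · -- piece matches and the rest is segmentable: return True with memory[d] := True
        have hres : recLoop avail m fuel d mem (i :: is)
            = (true, (recTowels avail m fuel (d.drop i.toNat) mem).2.insert d true) := by
          simp only [recLoop, hc, if_true, hrv]
        have hseg : seg avail m (d.drop i.toNat) = true := by rw [← hr1, hrv]
        rw [hres]
        refine ⟨?_, ?_, ?_, ?_, ?_⟩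
        · simp only [List.any_cons, hc, hseg, Bool.true_and, Bool.true_or]
        · intro s b hsl hget
          rw [PySem.Dict.get?_insert_of_ne _ _ (hne_len s hsl)] at hget
          rcases Nat.lt_or_ge s.length ((d.drop i.toNat).length + 1) with hcase | hcase
          · exact hr2 s b (by omega) hget
          · rw [hr3 s (by omega)] at hget
            exact hinv s b hsl hget
        · intro s hsne hsl
          rw [PySem.Dict.get?_insert_of_ne _ _ hsne]
          exact hr3 s (by rw [List.length_drop]; omega)
        · intro _; exact PySem.Dict.get?_insert_self _ _ _
        · intro h; exact absurd h (by simp)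
      · -- piece matches but the rest is not: memory[d] := False, keep looping
        have hrv' : (recTowels avail m fuel (d.drop i.toNat) mem).1 = false :=
          Bool.eq_false_iff.mpr hrv
        have hres : recLoop avail m fuel d mem (i :: is)
            = recLoop avail m fuel d
                ((recTowels avail m fuel (d.drop i.toNat) mem).2.insert d false) is := by
          simp only [recLoop, hc, if_true, hrv']
          simp
        have hseg : seg avail m (d.drop i.toNat) = false := by rw [← hr1, hrv']
        have hinv2 : ∀ s b, s.length < d.length →
            ((recTowels avail m fuel (d.drop i.toNat) mem).2.insert d false).get? s = some b →
            b = seg avail m s := by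
          intro s b hsl hget
          rw [PySem.Dict.get?_insert_of_ne _ _ (hne_len s hsl)] at hget
          rcases Nat.lt_or_ge s.length ((d.drop i.toNat).length + 1) with hcase | hcase
          · exact hr2 s b (by omega) hget
          · rw [hr3 s (by omega)] at hget
            exact hinv s b hsl hget
        obtain ⟨g1, g2, g3, g4, g5⟩ := ih _ _ hd hf
          (fun x hx => his x (List.mem_cons_of_mem _ hx)) hinv2
        rw [hres]
        refine ⟨?_, g2, ?_, g4, ?_⟩
        · simp only [List.any_cons, hc, hseg, Bool.true_and, Bool.false_or]
          exact g1
        · intro s hsne hsl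
          rw [g3 s hsne hsl, PySem.Dict.get?_insert_of_ne _ _ hsne]
          exact hr3 s (by rw [List.length_drop]; omega)
        · intro h
          rcases g5 h with h' | h'
          · right; rw [h']; exact PySem.Dict.get?_insert_self _ _ _
          · right; exact h'
    · -- piece not available: keep looping with memory unchanged
      have hc' : avail.contains (String.ofList (d.take i.toNat)) = false :=
        Bool.eq_false_iff.mpr hc
      have hres : recLoop avail m fuel d mem (i :: is) = recLoop avail m fuel d mem is := by
        simp only [recLoop, hc']
        simp
      obtain ⟨g1, g2, g3, g4, g5⟩ := ih d mem hd hf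
        (fun x hx => his x (List.mem_cons_of_mem _ hx)) hinv
      rw [hres]
      refine ⟨?_, g2, g3, g4, g5⟩
      simp only [List.any_cons, hc', Bool.false_and, Bool.false_or]
      exact g1

theorem recTowels_correct (avail : List String) (m : Int) :
    ∀ fuel (d : List Char) (mem : PySem.Dict (List Char) Bool),
      d.length < fuel →
      (∀ s b, s.length ≤ d.length → mem.get? s = some b → b = seg avail m s) →
      (recTowels avail m fuel d mem).1 = seg avail m d ∧
      (∀ s b, s.length ≤ d.length → (recTowels avail m fuel d mem).2.get? s = some b → b = seg avail m s) ∧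
      (∀ s : List Char, d.length < s.length → (recTowels avail m fuel d mem).2.get? s = mem.get? s) := by
  intro fuel
  induction fuel with
  | zero => intro d mem hlt; omega
  | succ fuel ihf =>
    intro d mem hlt hinv
    by_cases hnil : d.length = 0
    · have hres : recTowels avail m (fuel + 1) d mem = (true, mem) := by
        simp only [recTowels, hnil, if_true]
      rw [hres]
      have hd : d = [] := List.eq_nil_of_length_eq_zero hnil
      exact ⟨by rw [hd, seg_nil], hinv, fun _ _ => rfl⟩
    · have hd : d ≠ [] := fun h => hnil (by rw [h]; rfl)
      cases hget : mem.get? d with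
      | some v =>
        have hres : recTowels avail m (fuel + 1) d mem = (v, mem) := by
          simp only [recTowels, hnil, if_false, hget]
        rw [hres]
        exact ⟨hinv d v le_rfl hget, hinv, fun _ _ => rfl⟩
      | none =>
        have hres : recTowels avail m (fuel + 1) d mem
            = recLoop avail m fuel d mem
                (PySem.List.pyRange 1 (min m ((d.length : Int)) + 1) 1) := by
          simp only [recTowels, hnil, if_false, hget]
        obtain ⟨g1, g2, g3, g4, g5⟩ := recLoop_correct avail m fuel ihf
          (PySem.List.pyRange 1 (min m ((d.length : Int)) + 1) 1) d mem hd (by omega)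
          (fun x hx => by
            have := PySem.List.mem_pyRange_one.mp hx
            have h2 : x ≤ min m ((d.length : Int)) := by omega
            exact ⟨this.1, le_trans h2 (min_le_right _ _)⟩)
          (fun s b hsl => hinv s b (le_of_lt hsl))
        rw [hres]
        have hfst : (recLoop avail m fuel d mem
            (PySem.List.pyRange 1 (min m ((d.length : Int)) + 1) 1)).1 = seg avail m d := by
          rw [g1, seg_cons avail m d hd]
        refine ⟨hfst, ?_, ?_⟩
        · intro s b hsl hget'
          rcases Nat.lt_or_ge s.length d.length with hcase | hcase
          · exact g2 s b hcase hget'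
          · have hslen : s.length = d.length := by omega
            by_cases hsd : s = d
            · subst hsd
              cases hb : (recLoop avail m fuel s mem
                  (PySem.List.pyRange 1 (min m ((s.length : Int)) + 1) 1)).1 with
              | true =>
                rw [g4 hb] at hget'
                rw [← hfst, hb]
                cases hget'; rfl
              | false =>
                rcases g5 hb with h' | h'
                · rw [h', hget] at hget'; cases hget'
                · rw [h'] at hget'
                  rw [← hfst, hb]
                  cases hget'; rfl
            · rw [g3 s hsd (by omega)] at hget'
              exact hinv s b (by omega) hget'
        · intro s hsl
          exact g3 s (fun h => by rw [h] at hsl; omega) (le_of_lt hsl)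

-- ---- B side ----

-- the dp list built down to boundary t is exactly the suffix-segmentability table
theorem dp_fold_eq (avail : List String) (m : Int) (d : List Char) :
    ∀ t : Nat, t ≤ d.length →
      (PySem.List.pyRange ((t : Int) - 1) (-1) (-1)).foldl
        (fun dp i =>
          (((PySem.List.pyRange 1 (min m ((d.length : Int) - i) + 1) 1).any
            (fun j => PySem.Set.contains (PySem.Set.ofList avail) (String.ofList ((d.drop i.toNat).take j.toNat))
                      && PySem.List.pyGetD dp (j - 1) false)) :: dp))
        ((List.range (d.length + 1 - t)).map (fun k => seg avail m (d.drop (t + k))))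
      = (List.range (d.length + 1)).map (fun k => seg avail m (d.drop k)) := by
  intro t
  induction t with
  | zero =>
    intro _
    rw [show ((0 : Nat) : Int) - 1 = -1 by norm_num, PySem.List.pyRange_neg_one_eq_nil le_rfl]
    simp
  | succ t ih =>
    intro ht
    have htn : t ≤ d.length := Nat.le_of_succ_le ht
    have htlt : t < d.length := ht
    rw [show ((t + 1 : Nat) : Int) - 1 = (t : Int) by push_cast; ring,
        PySem.List.pyRange_neg_one_cons (by omega), List.foldl_cons]
    have hdrop : (d.drop t) ≠ [] := by
      intro h
      have := List.length_drop (l := d) (i := t)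
      rw [h] at this
      simp at this
      omega
    have hlen : ((d.drop t).length : Int) = (d.length : Int) - (t : Int) := by
      simp [List.length_drop]; omega
    have hv : ((PySem.List.pyRange 1 (min m ((d.length : Int) - (t : Int)) + 1) 1).any
        (fun j => PySem.Set.contains (PySem.Set.ofList avail)
                    (String.ofList ((d.drop ((t : Int)).toNat).take j.toNat))
                  && PySem.List.pyGetD
                      ((List.range (d.length + 1 - (t + 1))).map
                        (fun k => seg avail m (d.drop (t + 1 + k)))) (j - 1) false))
        = seg avail m (d.drop t) := by
      rw [seg_cons avail m _ hdrop, hlen]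
      refine (PySem.List.any_congr_mem ?_).symm
      intro j hj
      have hj1 : 1 ≤ j ∧ j < min m ((d.length : Int) - (t : Int)) + 1 :=
        PySem.List.mem_pyRange_one.mp hj
      have hj2 : 1 ≤ j.toNat ∧ (j.toNat : Int) = j ∧ j ≤ (d.length : Int) - (t : Int) := by
        constructor
        · omega
        constructor
        · omega
        · have := hj1.2; omega
      have hjle : j ≤ (d.length : Int) - (t : Int) :=
        le_trans (by omega : j ≤ min m ((d.length : Int) - (t : Int))) (min_le_right _ _)
      have hjn : (j - 1).toNat < d.length + 1 - (t + 1) := by omega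
      have hcont : List.contains avail (String.ofList ((d.drop t).take j.toNat))
          = PySem.Set.contains (PySem.Set.ofList avail)
              (String.ofList ((d.drop ((t : Int)).toNat).take j.toNat)) := by
        rw [show ((t : Int)).toNat = t from Int.toNat_natCast t]
        cases h : PySem.Set.contains (PySem.Set.ofList avail)
            (String.ofList ((d.drop t).take j.toNat)) with
        | false =>
          rw [← Bool.not_eq_true] at h
          rw [PySem.Set.contains_iff, PySem.Set.mem_ofList] at h
          simpa using h
        | true =>
          rw [PySem.Set.contains_iff, PySem.Set.mem_ofList] at h
          simpa using h
      have hget : PySem.List.pyGetD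
            ((List.range (d.length + 1 - (t + 1))).map
              (fun k => seg avail m (d.drop (t + 1 + k)))) (j - 1) false
          = seg avail m ((d.drop t).drop j.toNat) := by
        rw [PySem.List.pyGetD_of_nonneg _ (i := j - 1) false (by omega),
            PySem.List.getD_map_range _ _ _ _ hjn]
        rw [List.drop_drop, show t + 1 + (j - 1).toNat = t + j.toNat by omega]
      rw [hcont, hget]
    rw [hv]
    have hshape : seg avail m (d.drop t) ::
        (List.range (d.length + 1 - (t + 1))).map (fun k => seg avail m (d.drop (t + 1 + k)))
        = (List.range (d.length + 1 - t)).map (fun k => seg avail m (d.drop (t + k))) := by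
      rw [show d.length + 1 - t = (d.length + 1 - (t + 1)) + 1 by omega,
          List.range_succ_eq_map, List.map_cons, List.map_map]
      congr 1
      refine List.map_congr_left fun k _ => ?_
      simp only [Function.comp_def]
      rw [show t + 1 + k = t + (k + 1) by omega]
    exact hshape ▸ ih htn

-- A's per-string result is seg (fresh memo; fuel len+1 is enough)
lemma recTowels_seg (avail : List String) (m : Int) (td : String) :
    (recTowels avail m (td.toList.length + 1) td.toList PySem.Dict.empty).1
      = seg avail m td.toList :=
  (recTowels_correct avail m _ _ _ (by omega)
    (fun s b _ h => by rw [PySem.Dict.get?_empty] at h; cases h)).1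

-- B's per-string result is seg (dp table specialised at t = length)
lemma dp_head_seg (avail : List String) (m : Int) (d : List Char) :
    PySem.List.pyGetD
      ((PySem.List.pyRange ((d.length : Int) - 1) (-1) (-1)).foldl
        (fun dp i =>
          (((PySem.List.pyRange 1 (min m ((d.length : Int) - i) + 1) 1).any
            (fun j => PySem.Set.contains (PySem.Set.ofList avail) (String.ofList ((d.drop i.toNat).take j.toNat))
                      && PySem.List.pyGetD dp (j - 1) false)) :: dp))
        [true]) 0 false
      = seg avail m d := by
  have h0 : (List.range (d.length + 1 - d.length)).map
      (fun k => seg avail m (d.drop (d.length + k))) = [true] := by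
    rw [show d.length + 1 - d.length = 1 by omega]
    simp [List.range_one, List.drop_length, seg_nil]
  have hdp := dp_fold_eq avail m d d.length le_rfl
  rw [h0] at hdp
  rw [hdp, PySem.List.pyGetD_of_nonneg _ (i := 0) false le_rfl,
      PySem.List.getD_map_range _ _ _ _ (by omega : (0 : Int).toNat < d.length + 1)]
  simp

-- ===== VERDICT (by name: the statement is the Claim_ definition above) =====
theorem general_spec : Claim_equal_general := by
  unfold Claim_equal_general
  intro avail towels m _
  unfold Spec_general general general_alt
  have key : ∀ (l : List String) (acc : Int),
      l.foldl (fun result td =>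
          if (recTowels avail m (td.toList.length + 1) td.toList PySem.Dict.empty).1
          then result + 1 else result) acc
        = l.foldl (fun count desired =>
            count + (if PySem.List.pyGetD
                ((PySem.List.pyRange (((desired.toList.length : Int)) - 1) (-1) (-1)).foldl
                  (fun dp i =>
                    (((PySem.List.pyRange 1 (min m (((desired.toList.length : Int)) - i) + 1) 1).any
                      (fun j => PySem.Set.contains (PySem.Set.ofList avail)
                            (String.ofList ((desired.toList.drop i.toNat).take j.toNat))
                          && PySem.List.pyGetD dp (j - 1) false)) :: dp))
                  [true]) 0 false
              then 1 else 0)) acc := by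
    intro l
    induction l with
    | nil => intro _; rfl
    | cons td l ihl =>
      intro acc
      simp only [List.foldl_cons]
      rw [recTowels_seg avail m td, dp_head_seg avail m td.toList]
      cases seg avail m td.toList with
      | false => simpa using ihl acc
      | true => exact ihl (acc + 1)
  exact key towels 0
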